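-- pv_equiv track=rewrite | github.com/wonza-hub/Algorithm | 구현/문자열/괄호 변환.py | recurse
-- ===== SOURCE A (Python) =====
-- def sepa(w):
--     a,b=0,0
--     u,v='',''
--     for i in range(len(w)):
--         if w[i]=='(':
--             a+=1
--         elif w[i]==')':
--             b+=1
--         if a>0 and b>0 and a==b:
--             u,v=w[:i+1],w[i+1:]
--             break
--
--     return u,v
--
-- def correct(u):
--     stack=[]
--     for 괄호 in u:
--         if 괄호==')':
--             if stack and stack[-1]=='(':
--                 stack.pop()
--                 continue
--         stack.append(괄호)
--
--     return False if stack else True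
--
-- def slice(u):
--     return u[1:-1]
--
-- def reverse(u):
--     # replace 시 겹치는 문자를 한 번에 바꾸는 방법
--     # 둘 중 하나의 문자를 임의의 문자로 바꿔놓음
--     return u.replace('(','0').replace(')','(').replace('0',')')
--
-- def recurse(w):
--     if w=='':
--         return ''
--     u,v=sepa(w)
--
--     if correct(u):
--         return u+recurse(v)
--     else:
--         return '('+recurse(v)+')'+reverse(slice(u))
-- ===== SOURCE B (Python) =====
-- # Iterative single-pass re-implementation: A's non-tail recursion plus its three
-- # helper scans per level (sepa's counter scan and correct's stack scan) are fused
-- # into ONE left-to-right pass that carries the paren counters and an incremental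
-- # "well-formed so far" flag, cutting a segment off as soon as the counts first
-- # balance; results are collected in two accumulators joined once at the end.
--
-- def recurse(w):
--     left = []        # pieces of the answer, in order
--     rights = []      # trailing pieces, produced outside-in, emitted reversed
--     cur = []         # characters of the current (still open) segment
--     a = b = 0        # '(' / ')' counts inside the current segment
--     clean = True     # current segment is paren-only and never dipped below 0
--     for c in w:
--         cur.append(c)
--         if c == '(':
--             a += 1
--         elif c == ')':
--             b += 1
--             if a < b:
--                 clean = False
--         else:
--             clean = False
--         if a > 0 and b > 0 and a == b:
--             if clean:
--                 left.append(''.join(cur))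
--             else:
--                 left.append('(')
--                 rights.append(')' + ''.join(cur[1:-1])
--                               .replace('(', '0').replace(')', '(').replace('0', ')'))
--             cur, a, b, clean = [], 0, 0, True
--     return ''.join(left) + ''.join(reversed(rights))
-- ===== Notes on version B (the rewrite author's own statement) =====
-- stated objective: alternative
-- what changed: A's non-tail recursion with three helper scans per level (sepa's counter scan, correct's stack scan, plus slicing) is replaced by one left-to-right pass that carries the paren counters and an incremental well-formedness flag, cutting segments off as counts balance and joining two accumulator lists once at the end.
import Mathlib
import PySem

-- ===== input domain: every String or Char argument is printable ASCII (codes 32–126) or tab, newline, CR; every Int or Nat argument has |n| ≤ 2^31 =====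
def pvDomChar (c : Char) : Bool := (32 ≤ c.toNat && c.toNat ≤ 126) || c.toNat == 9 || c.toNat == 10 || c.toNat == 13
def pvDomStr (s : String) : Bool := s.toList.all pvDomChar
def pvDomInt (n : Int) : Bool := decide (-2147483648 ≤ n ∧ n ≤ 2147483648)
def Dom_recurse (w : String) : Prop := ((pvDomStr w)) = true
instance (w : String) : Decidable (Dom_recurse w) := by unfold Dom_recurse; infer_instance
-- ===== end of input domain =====

-- B fuses A's per-level helper scans (sepa + correct) and the non-tail recursion into
-- one single pass with counters, a cleanliness flag and two accumulators (alternative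
-- decomposition; same return value on every string).

-- ===== PORT A =====
-- sepa: scan w with counters a,b, break at the first index where a=b>0
def pvSepaGo (w : List Char) : List Char → Int → Int → Nat → List Char × List Char
  | [], _, _, _ => ([], [])
  | c :: rest, a, b, i =>
      let a' := if c = '(' then a + 1 else a
      let b' := if c = ')' then b + 1 else b
      if a' > 0 ∧ b' > 0 ∧ a' = b' then (w.take (i + 1), w.drop (i + 1))
      else pvSepaGo w rest a' b' (i + 1)

def pvSepa (w : List Char) : List Char × List Char := pvSepaGo w w 0 0 0

-- correct: the stack loop (stack head = Python stack[-1])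
def pvCorrectGo : List Char → List Char → List Char
  | stack, [] => stack
  | stack, c :: rest =>
      if c = ')' ∧ stack.head? = some '(' then pvCorrectGo stack.tail rest
      else pvCorrectGo (c :: stack) rest

def pvCorrect (u : List Char) : Bool := (pvCorrectGo [] u).isEmpty

-- reverse: the three sequential str.replace passes ('('→'0', ')'→'(', '0'→')')
def pvRev (u : List Char) : List Char :=
  ((u.map (fun c => if c = '(' then '0' else c)).map
      (fun c => if c = ')' then '(' else c)).map
    (fun c => if c = '0' then ')' else c)

-- slice: u[1:-1]
def pvSlice (u : List Char) : List Char := (u.drop 1).dropLast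

theorem pvSepaGo_snd_lt (w : List Char) (hw : 0 < w.length) :
    ∀ (cs : List Char) (a b : Int) (i : Nat), ((pvSepaGo w cs a b i).2).length < w.length := by
  intro cs
  induction cs with
  | nil => intro a b i; simp [pvSepaGo]; omega
  | cons c rest ih =>
      intro a b i
      simp only [pvSepaGo]
      repeat' split
      all_goals first
        | (simp; omega)
        | exact ih _ _ _

def recurseL (w : List Char) : List Char :=
  if w = [] then []
  else
    if pvCorrect (pvSepa w).1 then (pvSepa w).1 ++ recurseL (pvSepa w).2
    else '(' :: (recurseL (pvSepa w).2 ++ ')' :: pvRev (pvSlice (pvSepa w).1))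
termination_by w.length
decreasing_by all_goals
  exact pvSepaGo_snd_lt w (by cases w <;> simp_all) w 0 0 0

def recurse (w : String) : String := String.ofList (recurseL w.toList)

-- ===== PORT B =====
-- the composed replace chain of Source B's right-piece expression (same three passes)
def bRev (u : List Char) : List Char :=
  ((u.map (fun c => if c = '(' then '0' else c)).map
      (fun c => if c = ')' then '(' else c)).map
    (fun c => if c = '0' then ')' else c)

-- the single for-loop of Source B: state = (current segment cur, counters a b, clean flag),
-- accumulators left / rights; at the end: ''.join(left) + ''.join(reversed(rights))
def bLoop : List Char → List Char → Int → Int → Bool → List (List Char) → List (List Char) → List Char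
  | [], _, _, _, _, left, rights => left.flatten ++ rights.reverse.flatten
  | c :: rest, cur, a, b, clean, left, rights =>
      let cur' := cur ++ [c]
      let a' := if c = '(' then a + 1 else a
      let b' := if c = ')' then b + 1 else b
      let clean' := if c = '(' then clean
                    else if c = ')' then (clean && decide (b' ≤ a'))
                    else false
      if a' > 0 ∧ b' > 0 ∧ a' = b' then
        if clean' then bLoop rest [] 0 0 true (left ++ [cur']) rights
        else bLoop rest [] 0 0 true (left ++ [['(']])
               (rights ++ [')' :: bRev ((cur'.drop 1).dropLast)])
      else bLoop rest cur' a' b' clean' left rights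

def recurse_alt (w : String) : String := String.ofList (bLoop w.toList [] 0 0 true [] [])

-- ===== PRECONDITION & SPEC =====
def Spec_recurse (w : String) (out : String) : Prop := out = recurse_alt w
instance (w : String) (out : String) : Decidable (Spec_recurse w out) := by unfold Spec_recurse; infer_instance

-- ===== CLAIM (what is proved, stated in full; the proofs are below) =====
def Claim_equal_recurse : Prop := ∀ (w : String), Dom_recurse w → Spec_recurse w (recurse w)

-- ===== LEMMAS AND PROOFS =====

-- Int-valued paren counts of a segment prefix
def cntL (p : List Char) : Int := (p.count '(' : Int)
def cntR (p : List Char) : Int := (p.count ')' : Int)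

-- accumulator-free core of bLoop
def M : List Char → List Char → Int → Int → Bool → List Char
  | [], _, _, _, _ => []
  | c :: rest, cur, a, b, clean =>
      let cur' := cur ++ [c]
      let a' := if c = '(' then a + 1 else a
      let b' := if c = ')' then b + 1 else b
      let clean' := if c = '(' then clean
                    else if c = ')' then (clean && decide (b' ≤ a'))
                    else false
      if a' > 0 ∧ b' > 0 ∧ a' = b' then
        if clean' then cur' ++ M rest [] 0 0 true
        else '(' :: (M rest [] 0 0 true ++ ')' :: bRev ((cur'.drop 1).dropLast))
      else M rest cur' a' b' clean'

theorem bLoop_eq (cs : List Char) :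
    ∀ (cur : List Char) (a b : Int) (clean : Bool) (left rights : List (List Char)),
    bLoop cs cur a b clean left rights = left.flatten ++ M cs cur a b clean ++ rights.reverse.flatten := by
  induction cs with
  | nil => intro cur a b clean left rights; simp [bLoop, M]
  | cons c rest ih =>
      intro cur a b clean left rights
      simp only [bLoop, M]
      repeat' split
      all_goals simp [ih]

-- stack-free characterisation of pvCorrectGo: chk k u ↔ stack replicate k '(' empties
def chk : Nat → List Char → Bool
  | k, [] => decide (k = 0)
  | k, c :: r =>
      if c = '(' then chk (k + 1) r
      else if c = ')' then (if k = 0 then false else chk (k - 1) r)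
      else false

-- "clean" part alone: paren-only and never dips below zero
def cg : Nat → List Char → Bool
  | _, [] => true
  | k, c :: r =>
      if c = '(' then cg (k + 1) r
      else if c = ')' then (if k = 0 then false else cg (k - 1) r)
      else false

-- a non-'(' element in the stack is never removed, so the stack never empties
theorem pvCorrectGo_dirty (u : List Char) :
    ∀ (s : List Char) (x : Char), x ∈ s → x ≠ '(' → pvCorrectGo s u ≠ [] := by
  induction u with
  | nil => intro s x hx hne; simp [pvCorrectGo]; rintro rfl; simp at hx
  | cons c rest ih =>
      intro s x hx hne
      simp only [pvCorrectGo]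
      split
      · rename_i h
        obtain ⟨-, hhd⟩ := h
        cases s with
        | nil => simp at hhd
        | cons s0 st =>
            simp at hhd
            subst hhd
            rcases List.mem_cons.mp hx with rfl | hx'
            · exact absurd rfl hne
            · exact ih st x hx' hne
      · exact ih (c :: s) x (List.mem_cons_of_mem _ hx) hne

theorem pvCorrectGo_replicate (u : List Char) :
    ∀ k : Nat, (pvCorrectGo (List.replicate k '(') u).isEmpty = chk k u := by
  induction u with
  | nil => intro k; simp [pvCorrectGo, chk]
  | cons c rest ih =>
      intro k
      by_cases hc : c = '('
      · subst hc
        rw [pvCorrectGo, if_neg (by simp), chk]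
        simpa [← List.replicate_succ] using ih (k + 1)
      · by_cases hc2 : c = ')'
        · subst hc2
          cases k with
          | zero =>
              rw [pvCorrectGo, if_neg (by simp [List.head?])]
              simp only [chk, if_neg hc]
              have := pvCorrectGo_dirty rest (')' :: List.replicate 0 '(') ')' (by simp) (by decide)
              simpa [List.isEmpty_iff] using this
          | succ k' =>
              rw [pvCorrectGo, if_pos (by simp [List.replicate_succ])]
              simp only [chk, if_neg hc]
              simpa [List.replicate_succ] using ih k'
        · rw [pvCorrectGo, if_neg (by simp [hc2]), chk, if_neg hc, if_neg hc2]
          have := pvCorrectGo_dirty rest (c :: List.replicate k '(') c (by simp) (by simpa using hc)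
          simpa [List.isEmpty_iff] using this

-- congruence for the ')' branch of the clean-flag update
theorem ite_close (c : Char) {A B : Prop} [Decidable A] [Decidable B] (h : A ↔ B) :
    (if c = ')' then decide A else false) = (if c = ')' then decide B else false) := by
  by_cases hc : c = ')' <;> simp [hc, h]

-- chk = cg plus "counts balance out"
theorem chk_eq_cg (u : List Char) :
    ∀ k : Nat, chk k u = (cg k u && decide ((k : Int) + cntL u = cntR u)) := by
  induction u with
  | nil => intro k; simp [chk, cg, cntL, cntR]
  | cons c rest ih =>
      intro k
      by_cases hc : c = '('
      · subst hc
        have hL : cntL ('(' :: rest) = cntL rest + 1 := by simp [cntL]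
        have hR : cntR ('(' :: rest) = cntR rest := by simp [cntR]
        simp only [chk, cg, ih (k + 1), hL, hR, if_true]
        congr 1
        rw [decide_eq_decide]
        push_cast
        omega
      · by_cases hc2 : c = ')'
        · subst hc2
          have hL : cntL (')' :: rest) = cntL rest := by simp [cntL]
          have hR : cntR (')' :: rest) = cntR rest + 1 := by simp [cntR]
          cases k with
          | zero => simp [chk, cg, hc]
          | succ k' =>
              simp only [chk, cg, if_neg hc, if_neg (Nat.succ_ne_zero k'),
                Nat.succ_sub_one, ih k', hL, hR, if_true]
              congr 1
              rw [decide_eq_decide]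
              push_cast
              omega
        · simp [chk, cg, hc, hc2]

-- snoc step of cg: exactly B's incremental clean-flag update
theorem cg_snoc (p : List Char) (c : Char) :
    ∀ k : Nat, cg k (p ++ [c]) =
      (cg k p && (if c = '(' then true
                  else if c = ')' then decide ((0 : Int) < (k : Int) + cntL p - cntR p)
                  else false)) := by
  induction p with
  | nil =>
      intro k
      by_cases hc : c = '('
      · simp [cg, hc]
      · by_cases hc2 : c = ')'
        · subst hc2
          cases k with
          | zero => simp [cg, hc, cntL, cntR]
          | succ k' => simp [cg, hc, cntL, cntR]
        · simp [cg, hc, hc2]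
  | cons d p' ih =>
      intro k
      by_cases hd : d = '('
      · subst hd
        have hL : cntL ('(' :: p') = cntL p' + 1 := by simp [cntL]
        have hR : cntR ('(' :: p') = cntR p' := by simp [cntR]
        simp only [List.cons_append, cg, ih (k + 1), hL, hR, if_true]
        congr 2
        · exact ite_close c (by push_cast; omega)
      · by_cases hd2 : d = ')'
        · subst hd2
          have hL : cntL (')' :: p') = cntL p' := by simp [cntL]
          have hR : cntR (')' :: p') = cntR p' + 1 := by simp [cntR]
          cases k with
          | zero => simp [cg, hd]
          | succ k' =>
              simp only [List.cons_append, cg, if_neg hd,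
                if_neg (Nat.succ_ne_zero k'), Nat.succ_sub_one, ih k', hL, hR, if_true]
              congr 2
              · exact ite_close c (by push_cast; omega)
        · simp [cg, hd, hd2]

theorem cntL_snoc (p : List Char) (c : Char) :
    cntL (p ++ [c]) = (if c = '(' then cntL p + 1 else cntL p) := by
  by_cases hc : c = '(' <;> simp [cntL, hc, List.count_append]

theorem cntR_snoc (p : List Char) (c : Char) :
    cntR (p ++ [c]) = (if c = ')' then cntR p + 1 else cntR p) := by
  by_cases hc : c = ')' <;> simp [cntR, hc, List.count_append]

theorem take_len_append (p : List Char) (c : Char) (rest : List Char) :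
    (p ++ c :: rest).take (p.length + 1) = p ++ [c] := by
  induction p with
  | nil => simp
  | cons d p' ih => simpa using ih

theorem drop_len_append (p : List Char) (c : Char) (rest : List Char) :
    (p ++ c :: rest).drop (p.length + 1) = rest := by
  induction p with
  | nil => simp
  | cons d p' ih => simp [ih]

theorem pvSepaGo_nil_snd (w : List Char) :
    ∀ (cs : List Char) (a b : Int) (i : Nat),
      (pvSepaGo w cs a b i).1 = [] → (pvSepaGo w cs a b i).2 = [] := by
  intro cs
  induction cs with
  | nil => intro a b i _; simp [pvSepaGo]
  | cons c rest ih =>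
      intro a b i h
      simp only [pvSepaGo] at h ⊢
      by_cases hcond : ((if c = '(' then a + 1 else a) > 0 ∧ (if c = ')' then b + 1 else b) > 0 ∧
          (if c = '(' then a + 1 else a) = (if c = ')' then b + 1 else b))
      · rw [if_pos hcond] at h ⊢
        have hw : w = [] := by
          rcases List.take_eq_nil_iff.mp h with h1 | h1
          · omega
          · exact h1
        simp [hw]
      · rw [if_neg hcond] at h ⊢
        exact ih _ _ _ h

-- the inner scan correspondence: M with consistent state = one level of A's split
theorem M_scan (cs : List Char) :
    ∀ (p : List Char),
      M cs p (cntL p) (cntR p) (cg 0 p) =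
        (if (pvSepaGo (p ++ cs) cs (cntL p) (cntR p) p.length).1 = [] then []
         else if pvCorrect (pvSepaGo (p ++ cs) cs (cntL p) (cntR p) p.length).1 then
           (pvSepaGo (p ++ cs) cs (cntL p) (cntR p) p.length).1 ++
             M (pvSepaGo (p ++ cs) cs (cntL p) (cntR p) p.length).2 [] 0 0 true
         else
           '(' :: (M (pvSepaGo (p ++ cs) cs (cntL p) (cntR p) p.length).2 [] 0 0 true ++
             ')' :: pvRev (pvSlice (pvSepaGo (p ++ cs) cs (cntL p) (cntR p) p.length).1))) := by
  induction cs with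
  | nil => intro p; simp [M, pvSepaGo]
  | cons c rest ih =>
      intro p
      have ha' : (if c = '(' then cntL p + 1 else cntL p) = cntL (p ++ [c]) := (cntL_snoc p c).symm
      have hb' : (if c = ')' then cntR p + 1 else cntR p) = cntR (p ++ [c]) := (cntR_snoc p c).symm
      have hclean : (if c = '(' then cg 0 p
                     else if c = ')' then (cg 0 p && decide (cntR (p ++ [c]) ≤ cntL (p ++ [c])))
                     else false) = cg 0 (p ++ [c]) := by
        rw [cg_snoc]
        by_cases hc : c = '('
        · simp [hc]
        · by_cases hc2 : c = ')'
          · subst hc2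
            simp only [if_neg hc]
            have e1 : cntL (p ++ [')']) = cntL p := by rw [cntL_snoc]; simp
            have e2 : cntR (p ++ [')']) = cntR p + 1 := by rw [cntR_snoc]; simp
            rw [e1, e2]
            simp only [if_true]
            congr 1
            rw [decide_eq_decide]
            push_cast
            omega
          · simp [hc, hc2]
      rw [M, pvSepaGo]
      simp only [ha', hb', hclean]
      split
      · rename_i hcond
        -- split found at this character: u = p ++ [c], v = rest
        have ht : (p ++ c :: rest).take (p.length + 1) = p ++ [c] := take_len_append p c rest
        have hd : (p ++ c :: rest).drop (p.length + 1) = rest := drop_len_append p c rest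
        rw [ht, hd]
        have hne : (p ++ [c] : List Char) ≠ [] := by simp
        rw [if_neg hne]
        -- pvCorrect (p ++ [c]) = cg 0 (p ++ [c]) given balanced counts
        have hcorr : pvCorrect (p ++ [c]) = cg 0 (p ++ [c]) := by
          have h1 : pvCorrect (p ++ [c]) = chk 0 (p ++ [c]) := by
            have := pvCorrectGo_replicate (p ++ [c]) 0
            simpa [pvCorrect, List.replicate] using this
          rw [h1, chk_eq_cg]
          have hbal : cntL (p ++ [c]) = cntR (p ++ [c]) := hcond.2.2
          simp [hbal]
        rw [hcorr]
        cases hcg : cg 0 (p ++ [c]) <;>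
          simp [pvRev, bRev, pvSlice]
      · rename_i hcond
        have := ih (p ++ [c])
        rw [List.append_assoc] at this
        simp only [List.singleton_append, List.length_append, List.length_cons,
          List.length_nil] at this ⊢
        simpa using this

-- the outer recursion: M from a fresh state = recurseL
theorem M_eq_recurseL : ∀ (n : Nat) (cs : List Char), cs.length ≤ n →
    M cs [] 0 0 true = recurseL cs := by
  intro n
  induction n with
  | zero =>
      intro cs h
      have : cs = [] := List.length_eq_zero_iff.mp (Nat.le_zero.mp h)
      subst this
      simp [M, recurseL]
  | succ n ih =>
      intro cs h
      by_cases hnil : cs = []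
      · subst hnil; simp [M, recurseL]
      · have h0 : cntL ([] : List Char) = 0 := by simp [cntL]
        have h1 : cntR ([] : List Char) = 0 := by simp [cntR]
        have h2 : cg 0 ([] : List Char) = true := by simp [cg]
        have hscan := M_scan cs []
        rw [h0, h1, h2] at hscan
        simp only [List.nil_append, List.length_nil] at hscan
        have hsepa : pvSepaGo cs cs 0 0 0 = pvSepa cs := rfl
        rw [hsepa] at hscan
        have hlen : 0 < cs.length := by cases cs <;> simp_all
        have hvlt : (pvSepa cs).2.length < cs.length := pvSepaGo_snd_lt cs hlen cs 0 0 0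
        have hv : M (pvSepa cs).2 [] 0 0 true = recurseL (pvSepa cs).2 := ih _ (by omega)
        rw [hv] at hscan
        rw [hscan]
        by_cases hu : (pvSepa cs).1 = []
        · have hv2 : (pvSepa cs).2 = [] := pvSepaGo_nil_snd cs cs 0 0 0 hu
          rw [if_pos hu]
          rw [recurseL, if_neg hnil, hu, hv2]
          simp [pvCorrect, pvCorrectGo, recurseL]
        · rw [if_neg hu]
          conv_rhs => rw [recurseL, if_neg hnil]

-- ===== VERDICT (by name: the statement is the Claim_ definition above) =====
theorem recurse_spec : Claim_equal_recurse := by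
  intro w _
  show recurse w = recurse_alt w
  rw [recurse, recurse_alt, bLoop_eq]
  simp only [List.flatten_nil, List.reverse_nil, List.nil_append, List.append_nil]
  rw [M_eq_recurseL w.toList.length w.toList (le_refl _)]
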